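-- pv_equiv track=rewrite | github.com/claudioborja/biblioteca | demo_visits.py | build_ip_pool
-- ===== SOURCE A (Python) =====
-- def build_ip_pool(size: int) -> list[str]:
--     # Rango de documentacion TEST-NET-3 (RFC 5737), util para demo.
--     # Se generan IPs unicas para simular visitantes distintos.
--     ips: list[str] = []
--     base_a, base_b, base_c = 203, 0, 113
--     host = 1
--     while len(ips) < size:
--         ips.append(f"{base_a}.{base_b}.{base_c}.{host}")
--         host += 1
--         if host > 254:
--             host = 1
--             base_b = (base_b + 1) % 255
--     return ips
-- ===== SOURCE B (Python) =====
-- def build_ip_pool(size: int) -> list[str]: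
--     # TEST-NET-3 demo IPs, closed form: no mutable host/base_b state.
--     return [f"203.{(i // 254) % 255}.113.{i % 254 + 1}" for i in range(size)]
-- ===== Notes on version B (the rewrite author's own statement) =====
-- stated objective: simpler
-- what changed: Replaces A's while-loop with mutable host/base_b accumulators and a carry/reset branch by a single comprehension computing each octet in closed form from the index ((i//254)%255 and i%254+1).
import Mathlib
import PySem

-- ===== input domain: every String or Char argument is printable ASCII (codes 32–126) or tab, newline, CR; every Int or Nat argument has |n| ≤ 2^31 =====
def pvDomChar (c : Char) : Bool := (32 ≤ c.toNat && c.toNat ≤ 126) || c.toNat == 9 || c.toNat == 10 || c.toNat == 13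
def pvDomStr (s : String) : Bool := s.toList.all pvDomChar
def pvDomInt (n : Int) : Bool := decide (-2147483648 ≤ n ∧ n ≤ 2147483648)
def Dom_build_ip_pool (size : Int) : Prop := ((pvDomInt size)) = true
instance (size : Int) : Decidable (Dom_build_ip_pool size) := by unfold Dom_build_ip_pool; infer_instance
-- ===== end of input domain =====

-- B replaces A's mutable host/base_b accumulators and carry/reset branch by a closed-form
-- comprehension over range(size); objective: simpler.

-- ===== PORT A =====
-- A's while-loop with its full mutable state (base_a, base_b, base_c, host)
def pvLoopA (size : Int) (ips : List String) (base_a base_b base_c host : Int) : List String :=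
  if (ips.length : Int) < size then
    if host + 1 > 254 then
      pvLoopA size
        (ips ++ [PySem.Int.toStr base_a ++ "." ++ PySem.Int.toStr base_b ++ "." ++
                 PySem.Int.toStr base_c ++ "." ++ PySem.Int.toStr host])
        base_a (PySem.Int.mod (base_b + 1) 255) base_c 1
    else
      pvLoopA size
        (ips ++ [PySem.Int.toStr base_a ++ "." ++ PySem.Int.toStr base_b ++ "." ++
                 PySem.Int.toStr base_c ++ "." ++ PySem.Int.toStr host])
        base_a base_b base_c (host + 1)
  else ips
termination_by (size - ips.length).toNat
decreasing_by all_goals (simp [List.length_append]; omega)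

def build_ip_pool (size : Int) : List String :=
  pvLoopA size [] 203 0 113 1

-- ===== PORT B =====
def build_ip_pool_alt (size : Int) : List String :=
  (PySem.List.pyRange 0 size 1).map (fun i =>
    "203." ++ PySem.Int.toStr (PySem.Int.mod (PySem.Int.floordiv i 254) 255) ++
    ".113." ++ PySem.Int.toStr (PySem.Int.mod i 254 + 1))

-- ===== PRECONDITION & SPEC =====
def Spec_build_ip_pool (size : Int) (out : List String) : Prop := out = build_ip_pool_alt size
instance (size : Int) (out : List String) : Decidable (Spec_build_ip_pool size out) := by unfold Spec_build_ip_pool; infer_instance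

-- ===== CLAIM (what is proved, stated in full; the proofs are below) =====
def Claim_equal_build_ip_pool : Prop := ∀ (size : Int), Dom_build_ip_pool size → Spec_build_ip_pool size (build_ip_pool size)

-- ===== LEMMAS AND PROOFS =====

-- the element B emits at index i
def pvElem (i : Int) : String :=
  "203." ++ PySem.Int.toStr (PySem.Int.mod (PySem.Int.floordiv i 254) 255) ++
  ".113." ++ PySem.Int.toStr (PySem.Int.mod i 254 + 1)

lemma pvString_shape (s1 s2 : String) :
    PySem.Int.toStr 203 ++ "." ++ s1 ++ "." ++ PySem.Int.toStr 113 ++ "." ++ s2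
      = "203." ++ s1 ++ ".113." ++ s2 := by
  have h203 : PySem.Int.toStr 203 ++ "." = "203." := by decide
  have h113 : "." ++ PySem.Int.toStr 113 ++ "." = ".113." := by decide
  calc PySem.Int.toStr 203 ++ "." ++ s1 ++ "." ++ PySem.Int.toStr 113 ++ "." ++ s2
      = (PySem.Int.toStr 203 ++ ".") ++ s1 ++ ("." ++ PySem.Int.toStr 113 ++ ".") ++ s2 := by
        simp [String.append_assoc]
    _ = "203." ++ s1 ++ ".113." ++ s2 := by rw [h203, h113]

-- the string A appends when ips.length = k equals B's element at index k
lemma pvElem_eq (k : Int) (hk : 0 ≤ k) :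
    PySem.Int.toStr 203 ++ "." ++ PySem.Int.toStr ((k / 254) % 255) ++ "." ++
      PySem.Int.toStr 113 ++ "." ++ PySem.Int.toStr (k % 254 + 1) = pvElem k := by
  unfold pvElem
  rw [PySem.Int.floordiv_eq_ediv_of_pos (by norm_num : (0:Int) < 254),
      PySem.Int.mod_eq_emod_of_pos (by norm_num : (0:Int) < 255),
      PySem.Int.mod_eq_emod_of_pos (by norm_num : (0:Int) < 254),
      pvString_shape]

-- loop invariant: with the state A holds after ips.length appends, the loop returns
-- ips followed by B's elements for the remaining indices
lemma pvLoopA_inv : ∀ (n : Nat) (size : Int) (ips : List String),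
    (size - ips.length).toNat = n →
    pvLoopA size ips 203 (((ips.length : Int) / 254) % 255) 113 ((ips.length : Int) % 254 + 1)
      = ips ++ (PySem.List.pyRange (ips.length : Int) size 1).map pvElem := by
  intro n
  induction n with
  | zero =>
    intro size ips h
    rw [pvLoopA, PySem.List.pyRange_one_eq_nil (by omega)]
    simp [show ¬ ((ips.length : Int) < size) by omega]
  | succ m ih =>
    intro size ips h
    set k : Int := (ips.length : Int) with hk
    have hk0 : 0 ≤ k := Int.natCast_nonneg _
    have hlt : k < size := by omega
    have hrange : PySem.List.pyRange k size 1 = k :: PySem.List.pyRange (k+1) size 1 :=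
      PySem.List.pyRange_one_cons hlt
    have helem := pvElem_eq k hk0
    rw [pvLoopA, if_pos hlt, helem]
    have ih' := ih size (ips ++ [pvElem k]) (by simp [hk]; omega)
    rw [show (((ips ++ [pvElem k]).length : Int)) = k + 1 by simp [hk]] at ih'
    by_cases hhost : k % 254 + 1 + 1 > 254
    · have h253 : k % 254 = 253 := by omega
      rw [if_pos hhost]
      rw [show ((k+1) / 254 % 255) = PySem.Int.mod (k / 254 % 255 + 1) 255 by
            rw [PySem.Int.mod_eq_emod_of_pos (by norm_num : (0:Int) < 255)]; omega,
          show ((k+1) % 254 + 1) = 1 by omega] at ih'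
      rw [ih', hrange]
      simp
    · rw [if_neg hhost]
      rw [show ((k+1) / 254 % 255) = k / 254 % 255 by omega,
          show ((k+1) % 254 + 1) = k % 254 + 1 + 1 by omega] at ih'
      rw [ih', hrange]
      simp

-- ===== VERDICT (by name: the statement is the Claim_ definition above) =====
theorem build_ip_pool_spec : Claim_equal_build_ip_pool := by
  intro size _
  show build_ip_pool size = build_ip_pool_alt size
  have halt : build_ip_pool_alt size = (PySem.List.pyRange 0 size 1).map pvElem := rfl
  have h := pvLoopA_inv (size - ([] : List String).length).toNat size [] rfl
  norm_num at h
  rw [build_ip_pool, halt]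
  exact h
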